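-- pv_equiv track=rewrite | github.com/prushh/movie-lens-mlp | src/utils/util_models.py | get_set_params
-- ===== SOURCE A (Python) =====
-- def get_set_params(prod, num_sets: int, selected_set: int):
--     if selected_set > num_sets:
--         selected_set = num_sets - 1
--     elif selected_set <= -1:
--         return prod
--
--     def chunkify(lst, n):
--         return [lst[i::n] for i in range(n)]
--
--     tagged_list = [(index,) + element for index, element in enumerate(list(prod))]
--     return chunkify(tagged_list, num_sets)[selected_set]
-- ===== SOURCE B (Python) =====
-- def get_set_params(prod, num_sets: int, selected_set: int):
--     if selected_set > num_sets:
--         selected_set = num_sets - 1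
--     elif selected_set <= -1:
--         return prod
--
--     buckets = [[] for _ in range(num_sets)]
--     for index, element in enumerate(prod):
--         buckets[index % num_sets].append((index,) + element)
--     return buckets[selected_set]
-- ===== Notes on version B (the rewrite author's own statement) =====
-- stated objective: alternative
-- what changed: A tags every element and cuts n stride-slices lst[i::n], then indexes the chosen one; B makes a single round-robin distributing pass that appends each tagged element to buckets[index % num_sets] and returns the selected bucket.
import Mathlib
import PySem

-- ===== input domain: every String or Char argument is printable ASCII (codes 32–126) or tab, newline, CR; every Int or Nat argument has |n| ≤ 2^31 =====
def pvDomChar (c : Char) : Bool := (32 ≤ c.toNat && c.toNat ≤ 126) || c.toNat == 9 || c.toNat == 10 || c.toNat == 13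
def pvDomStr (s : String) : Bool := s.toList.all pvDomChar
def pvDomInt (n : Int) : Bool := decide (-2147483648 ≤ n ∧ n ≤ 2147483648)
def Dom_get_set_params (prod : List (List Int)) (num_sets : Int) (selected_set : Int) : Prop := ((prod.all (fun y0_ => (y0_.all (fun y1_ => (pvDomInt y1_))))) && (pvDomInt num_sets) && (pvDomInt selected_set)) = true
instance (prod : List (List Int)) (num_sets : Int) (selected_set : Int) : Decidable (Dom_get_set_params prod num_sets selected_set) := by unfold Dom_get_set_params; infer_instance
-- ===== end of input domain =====

-- B replaces A's num_sets stride-slices lst[i::num_sets] by one round-robin distributing pass into buckets (alternative decomposition, same cost class).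

-- ===== PORT A =====
-- tagging + chunkify + final index of A's non-early-return path ('.getD []' totalises the
-- IndexError of 'chunkify(...)[selected_set]' and the step=0 slice; both are outside Pre_)
def pvChunkBody (prod : List (List Int)) (num_sets sel : Int) : List (List Int) :=
  let tagged := (PySem.List.enumerate prod 0).map (fun p => p.1 :: p.2)
  let chunks := (PySem.List.pyRange 0 num_sets 1).map
      (fun i => (PySem.List.slice? tagged (some i) none num_sets).getD [])
  (PySem.List.pyGet? chunks sel).getD []

def get_set_params (prod : List (List Int)) (num_sets : Int) (selected_set : Int) : List (List Int) :=
  if num_sets < selected_set then pvChunkBody prod num_sets (num_sets - 1)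
  else if selected_set ≤ -1 then prod
  else pvChunkBody prod num_sets selected_set

-- ===== PORT B =====
-- build num_sets empty buckets, append each tagged element to buckets[index % num_sets],
-- return the selected bucket ('.getD []' totalises the final IndexError, outside Pre_)
def pvBucketBody (prod : List (List Int)) (num_sets sel : Int) : List (List Int) :=
  let buckets0 : List (List (List Int)) := (PySem.List.pyRange 0 num_sets 1).map (fun _ => [])
  let buckets := (PySem.List.enumerate prod 0).foldl
      (fun bs p => PySem.List.pySetD bs (PySem.Int.mod p.1 num_sets)
        ((PySem.List.pyGetD bs (PySem.Int.mod p.1 num_sets) []) ++ [p.1 :: p.2])) buckets0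
  (PySem.List.pyGet? buckets sel).getD []

def get_set_params_alt (prod : List (List Int)) (num_sets : Int) (selected_set : Int) : List (List Int) :=
  if num_sets < selected_set then pvBucketBody prod num_sets (num_sets - 1)
  else if selected_set ≤ -1 then prod
  else pvBucketBody prod num_sets selected_set

-- ===== PRECONDITION & SPEC =====
-- Pre_ is exactly where A returns normally: either the early 'return prod' branch fires, or
-- num_sets is positive and the chunk index left after the clamp is in range of the
-- num_sets chunks (otherwise 'chunkify(...)[selected_set]' raises IndexError).
def Pre_get_set_params (prod : List (List Int)) (num_sets : Int) (selected_set : Int) : Prop :=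
  (selected_set ≤ -1 ∧ selected_set ≤ num_sets) ∨
  (0 < num_sets ∧ (num_sets < selected_set ∨ (0 ≤ selected_set ∧ selected_set < num_sets)))
instance (prod : List (List Int)) (num_sets : Int) (selected_set : Int) : Decidable (Pre_get_set_params prod num_sets selected_set) := by unfold Pre_get_set_params; infer_instance

def pvWitness_get_set_params : List (List Int) × Int × Int := ([[1, 2], [3], [4], [5, 6], [7]], 3, 1)

def Spec_get_set_params (prod : List (List Int)) (num_sets : Int) (selected_set : Int) (out : List (List Int)) : Prop := out = get_set_params_alt prod num_sets selected_set
instance (prod : List (List Int)) (num_sets : Int) (selected_set : Int) (out : List (List Int)) : Decidable (Spec_get_set_params prod num_sets selected_set out) := by unfold Spec_get_set_params; infer_instance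

-- ===== CLAIM (what is proved, stated in full; the proofs are below) =====
def Claim_equal_get_set_params : Prop := ∀ (prod : List (List Int)) (num_sets : Int) (selected_set : Int), Dom_get_set_params prod num_sets selected_set → Pre_get_set_params prod num_sets selected_set → Spec_get_set_params prod num_sets selected_set (get_set_params prod num_sets selected_set)

-- ===== LEMMAS AND PROOFS =====

-- the stripe of residue class j mod n drawn from an already-enumerated list, as tagged rows
def pvStripeE (q : List (Int × List Int)) (j n : Int) : List (List Int) :=
  match q with
  | [] => []
  | p :: t => (if PySem.Int.mod p.1 n = j then [p.1 :: p.2] else []) ++ pvStripeE t j n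

-- every n-th element starting at offset s (what Python's xs[s::n] collects, for 0 ≤ s < n)
def pvPick (xs : List (List Int)) (s n : Int) : List (List Int) :=
  match xs with
  | [] => []
  | x :: t => if s = 0 then x :: pvPick t (n - 1) n else pvPick t (s - 1) n

-- writing position i of a mapped pyRange 0 n updates the mapped function at i
lemma pvSet_map_range (n : Int) (g : Int → List (List Int)) (i : Int) (v : List (List Int))
    (h0 : 0 ≤ i) (h1 : i < n) :
    PySem.List.pySetD ((PySem.List.pyRange 0 n 1).map g) i v
      = (PySem.List.pyRange 0 n 1).map (fun j => if j = i then v else g j) := by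
  rw [PySem.List.pySetD_of_nonneg _ v h0, PySem.List.pyRange_one]
  apply List.ext_getElem
  · simp
  · intro k hk _
    simp only [List.getElem_set, List.getElem_map, List.getElem_range]
    simp only [List.length_set, List.length_map, List.length_range] at hk
    by_cases hik : k = i.toNat
    · subst hik
      have h : (0 : Int) + ((i.toNat : Nat) : Int) = i := by omega
      simp only [h]
    · have h : ¬ ((0 : Int) + (k : Int) = i) := by omega
      simp
      rw [if_neg (by omega : ¬ i.toNat = k), if_neg (by omega : ¬ ((k : Nat) : Int) = i)]

-- the round-robin fold distributes each tagged row into the bucket of its residue class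
lemma pvFold_invariant (n : Int) (hn : 0 < n) :
    ∀ (q : List (Int × List Int)) (g : Int → List (List Int)),
    q.foldl (fun bs p => PySem.List.pySetD bs (PySem.Int.mod p.1 n)
        ((PySem.List.pyGetD bs (PySem.Int.mod p.1 n) []) ++ [p.1 :: p.2]))
      ((PySem.List.pyRange 0 n 1).map g)
    = (PySem.List.pyRange 0 n 1).map (fun j => g j ++ pvStripeE q j n) := by
  intro q
  induction q with
  | nil => intro g; simp [pvStripeE]
  | cons p t ih =>
      intro g
      have hm0 : 0 ≤ PySem.Int.mod p.1 n := PySem.Int.mod_nonneg _ hn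
      have hm1 : PySem.Int.mod p.1 n < n := PySem.Int.mod_lt _ hn
      simp only [List.foldl_cons]
      rw [PySem.List.pyGetD_map_pyRange_of_nonneg g n _ [] hm0 hm1]
      rw [pvSet_map_range n g _ _ hm0 hm1, ih]
      apply List.map_congr_left
      intro j _
      by_cases hj : j = PySem.Int.mod p.1 n
      · simp [pvStripeE, hj, List.append_assoc]
      · simp [pvStripeE, hj, Ne.symm hj]

-- xs[s::n] on the empty list
lemma pvSlice_nil (s n : Int) (hs : 0 ≤ s) (hn : 0 < n) :
    PySem.List.slice? ([] : List (List Int)) (some s) none n = some [] := by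
  simp only [PySem.List.slice?, PySem.List.sliceIndices, if_neg hn.ne',
    if_neg (by omega : ¬ n < 0), if_neg (by omega : ¬ s < 0), if_pos hn]
  norm_num

-- xs[s::n] for s ≥ 1 drops the head and shifts the offset
lemma pvSlice_cons_pos (x : List Int) (t : List (List Int)) (s n : Int)
    (hs : 1 ≤ s) (hn : 0 < n) :
    PySem.List.slice? (x :: t) (some s) none n = PySem.List.slice? t (some (s - 1)) none n := by
  simp only [PySem.List.slice?, PySem.List.sliceIndices, if_neg hn.ne',
    if_neg (by omega : ¬ n < 0)]
  simp only [if_neg (by omega : ¬ s < 0), if_neg (by omega : ¬ s - 1 < 0), if_pos hn]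
  set m : Int := (t.length : Int) with hm
  have hm0 : 0 ≤ m := by simp [hm]
  have hlen : ((x :: t).length : Int) = m + 1 := by simp [hm]
  rw [hlen]
  have ha : min s (m + 1) = min (s - 1) m + 1 := by omega
  rw [ha]
  have hcond : (min (s - 1) m + 1 < m + 1) ↔ (min (s - 1) m < m) := by omega
  have hnum : m + 1 - (min (s - 1) m + 1) + n - 1 = m - min (s - 1) m + n - 1 := by ring
  split_ifs with h h' h'
  · rw [hnum]
    apply congrArg
    apply List.filterMap_congr
    intro k _
    have hnk : 0 ≤ n * (k : Int) := by positivity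
    have hb : 0 ≤ min (s - 1) m := by omega
    have hidx : (min (s - 1) m + 1 + n * (k : Int)).toNat
        = (min (s - 1) m + n * (k : Int)).toNat + 1 := by omega
    rw [hidx, List.getElem?_cons_succ]
  · exact absurd (hcond.mp h) h'
  · exact absurd (hcond.mpr h') h
  · rfl

-- xs[0::n] keeps the head and continues with offset n-1
lemma pvSlice_cons_zero (x : List Int) (t : List (List Int)) (n : Int) (hn : 0 < n) :
    PySem.List.slice? (x :: t) (some 0) none n
      = (PySem.List.slice? t (some (n - 1)) none n).map (x :: ·) := by
  simp only [PySem.List.slice?, PySem.List.sliceIndices, if_neg hn.ne',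
    if_neg (by omega : ¬ n < 0)]
  simp only [if_neg (by omega : ¬ (0 : Int) < 0), if_neg (by omega : ¬ n - 1 < 0), if_pos hn]
  set m : Int := (t.length : Int) with hm
  have hm0 : 0 ≤ m := by simp [hm]
  have hlen : ((x :: t).length : Int) = m + 1 := by simp [hm]
  rw [hlen]
  have hmin0 : min (0 : Int) (m + 1) = 0 := by omega
  rw [hmin0, if_pos (by omega : (0:Int) < m + 1)]
  have hdvd : ((m + n) / n) = m / n + 1 := by
    have := Int.add_mul_ediv_right m 1 hn.ne'
    simpa using this
  have hc1 : ((m + 1 - 0 + n - 1) / n).toNat = (m / n).toNat + 1 := by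
    have h1 : m + 1 - 0 + n - 1 = m + n := by ring
    have h2 : 0 ≤ m / n := Int.ediv_nonneg hm0 hn.le
    rw [h1, hdvd]; omega
  rw [hc1]
  have hrc : (if min (n - 1) m < m then (((m - min (n - 1) m + n - 1) / n).toNat) else 0)
      = (m / n).toNat := by
    by_cases hcase : n - 1 < m
    · rw [if_pos (by omega), min_eq_left (by omega)]
      have h3 : m - (n - 1) + n - 1 = m := by ring
      rw [h3]
    · rw [if_neg (by omega)]
      have : m / n = 0 := Int.ediv_eq_zero_of_lt hm0 (by omega)
      omega
  rw [hrc]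
  rw [List.range_succ_eq_map, List.filterMap_cons]
  have hf0 : (x :: t)[((0:Int) + n * ((0:Nat):Int)).toNat]? = some x := by norm_num
  rw [hf0, List.filterMap_map]
  refine congrArg (fun l => some (x :: l)) ?_
  apply List.filterMap_congr
  intro k hk
  have hc : 0 < (m / n).toNat := Nat.zero_lt_of_lt (List.mem_range.mp hk)
  have hge : n ≤ m := by
    have h1 : (1:Int) ≤ m / n := by omega
    have := (Int.le_ediv_iff_mul_le hn).mp h1
    omega
  have hminn : min (n - 1) m = n - 1 := by omega
  rw [hminn]
  simp only [Function.comp]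
  have hnk : 0 ≤ n * (k : Int) := by positivity
  have hsplit : n * ((Nat.succ k : Nat) : Int) = n - 1 + n * (k : Int) + 1 := by
    push_cast; ring
  have hidx : ((0:Int) + n * ((Nat.succ k : Nat) : Int)).toNat
      = (n - 1 + n * (k : Int)).toNat + 1 := by omega
  rw [hidx, List.getElem?_cons_succ]

-- xs[s::n] is pvPick
lemma pvSlice_eq_pick (xs : List (List Int)) (s n : Int) (hs : 0 ≤ s) (hn : 0 < n) :
    PySem.List.slice? xs (some s) none n = some (pvPick xs s n) := by
  induction xs generalizing s with
  | nil => rw [pvSlice_nil s n hs hn]; rfl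
  | cons x t ih =>
      by_cases h0 : s = 0
      · subst h0
        rw [pvSlice_cons_zero x t n hn, ih (n - 1) (by omega)]
        simp [pvPick]
      · rw [pvSlice_cons_pos x t s n (by omega) hn, ih (s - 1) (by omega)]
        simp [pvPick, h0]

-- picking every n-th tagged row starting at offset mod (j - c) n is the residue-j stripe
lemma pvPick_eq_stripe (n : Int) (hn : 0 < n) :
    ∀ (l : List (List Int)) (c j : Int), 0 ≤ j → j < n →
    pvPick ((PySem.List.enumerate l c).map (fun p => p.1 :: p.2)) (PySem.Int.mod (j - c) n) n
      = pvStripeE (PySem.List.enumerate l c) j n := by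
  intro l
  induction l with
  | nil => intro c j _ _; simp [PySem.List.enumerate_nil, pvPick, pvStripeE]
  | cons x t ih =>
      intro c j hj0 hj1
      rw [PySem.List.enumerate_cons]
      simp only [List.map_cons, pvStripeE, pvPick]
      have hmodc : PySem.Int.mod (j - c) n = (j - c) % n := PySem.Int.mod_eq_emod_of_pos hn
      have hmodc1 : PySem.Int.mod (j - (c + 1)) n = (j - (c + 1)) % n :=
        PySem.Int.mod_eq_emod_of_pos hn
      have hmodcc : PySem.Int.mod c n = c % n := PySem.Int.mod_eq_emod_of_pos hn
      by_cases hz : PySem.Int.mod (j - c) n = 0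
      · -- head is in residue class j
        have hdvd : n ∣ (j - c) := (PySem.Int.mod_eq_zero_iff_dvd _ _).mp hz
        have hcj : PySem.Int.mod c n = j := by
          rw [hmodcc]
          obtain ⟨q, hq⟩ := hdvd
          have h2 : n * (-q) = -(n * q) := by ring
          have h : c = j + n * (-q) := by omega
          rw [h, Int.add_mul_emod_self_left]
          exact Int.emod_eq_of_lt hj0 hj1
        rw [if_pos hz, if_pos hcj]
        have hshift : PySem.Int.mod (j - (c + 1)) n = n - 1 := by
          rw [hmodc1]
          obtain ⟨q, hq⟩ := hdvd
          have h2 : n * (q - 1) = n * q - n := by ring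
          have h : j - (c + 1) = n - 1 + n * (q - 1) := by omega
          rw [h, Int.add_mul_emod_self_left]
          exact Int.emod_eq_of_lt (by omega) (by omega)
        rw [← hshift, ih (c + 1) j hj0 hj1]
        simp
      · -- head is not in residue class j
        have hcj : ¬ PySem.Int.mod c n = j := by
          intro hc
          apply hz
          rw [PySem.Int.mod_eq_zero_iff_dvd]
          rw [hmodcc] at hc
          have h := Int.emod_add_mul_ediv c n
          refine ⟨-(c / n), ?_⟩
          have h2 : n * -(c / n) = -(n * (c / n)) := by ring
          omega
        rw [if_neg hz, if_neg hcj]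
        have hpos : 0 < PySem.Int.mod (j - c) n := by
          have := PySem.Int.mod_nonneg (j - c) hn
          omega
        have hub : PySem.Int.mod (j - c) n < n := PySem.Int.mod_lt _ hn
        have hshift : PySem.Int.mod (j - (c + 1)) n = PySem.Int.mod (j - c) n - 1 := by
          rw [hmodc1, hmodc]
          rw [hmodc] at hpos hub
          have h : j - (c + 1) = (j - c) % n - 1 + n * ((j - c) / n) := by
            have := Int.emod_add_mul_ediv (j - c) n
            omega
          rw [h, Int.add_mul_emod_self_left]
          exact Int.emod_eq_of_lt (by omega) (by omega)
        rw [← hshift, ih (c + 1) j hj0 hj1]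
        simp

-- on the admitted chunk indices the two bodies agree
lemma pvBody_eq (prod : List (List Int)) (n s : Int) (h0 : 0 ≤ s) (h1 : s < n) :
    pvChunkBody prod n s = pvBucketBody prod n s := by
  have hn : 0 < n := by omega
  simp only [pvChunkBody, pvBucketBody]
  have hA : (PySem.List.pyGet? ((PySem.List.pyRange 0 n 1).map
      (fun i => (PySem.List.slice? ((PySem.List.enumerate prod 0).map (fun p => p.1 :: p.2))
        (some i) none n).getD [])) s).getD []
      = (PySem.List.slice? ((PySem.List.enumerate prod 0).map (fun p => p.1 :: p.2))
        (some s) none n).getD [] :=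
    PySem.List.pyGetD_map_pyRange_of_nonneg _ n s [] h0 h1
  rw [hA, pvSlice_eq_pick _ s n h0 hn]
  rw [pvFold_invariant n hn (PySem.List.enumerate prod 0) (fun _ => [])]
  have hB : (PySem.List.pyGet? ((PySem.List.pyRange 0 n 1).map
      (fun j => ([] : List (List Int)) ++ pvStripeE (PySem.List.enumerate prod 0) j n)) s).getD []
      = [] ++ pvStripeE (PySem.List.enumerate prod 0) s n :=
    PySem.List.pyGetD_map_pyRange_of_nonneg _ n s [] h0 h1
  rw [hB]
  have hmods : PySem.Int.mod (s - 0) n = s := by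
    rw [PySem.Int.mod_eq_emod_of_pos hn]
    simpa using Int.emod_eq_of_lt h0 h1
  have h := pvPick_eq_stripe n hn prod 0 s h0 h1
  rw [hmods] at h
  simp [h]

-- ===== VERDICT (by name: the statement is the Claim_ definition above) =====
theorem get_set_params_spec : Claim_equal_get_set_params := by
  intro prod num_sets selected_set _ hpre
  unfold Spec_get_set_params get_set_params get_set_params_alt
  rcases hpre with ⟨h1, h2⟩ | ⟨hn, hs⟩
  · simp [show ¬ num_sets < selected_set from by omega, h1]
  · rcases hs with h | ⟨h0, h1⟩
    · simp [h, pvBody_eq prod num_sets (num_sets - 1) (by omega) (by omega)]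
    · simp [show ¬ num_sets < selected_set from by omega, show ¬ selected_set ≤ -1 from by omega,
        pvBody_eq prod num_sets selected_set h0 h1]
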